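-- pv_equiv track=rewrite | github.com/yeshaokai/mae_st | data/extract_keyframes.py | calc_interval
-- ===== SOURCE A (Python) =====
-- from collections import defaultdict
--
-- def calc_interval(cluster_labels):
--     interval2start = defaultdict(list)
--     interval_list = []
--     interval_length = 0
--     prev_label = cluster_labels[0]
--     for i in range(1, len(cluster_labels)):
--         interval_length +=1
--         if cluster_labels[i] != cluster_labels[i-1]:
--             start = i - interval_length
--             prev_label = cluster_labels[i]
--             interval2start[interval_length].append(start)
--             interval_list.append(interval_length)
--             interval_length = 0
--
--     return interval2start
-- ===== SOURCE B (Python) =====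
-- from collections import defaultdict
--
-- def calc_interval(cluster_labels):
--     n = len(cluster_labels)
--     bounds = [0] + [i for i in range(1, n)
--                     if cluster_labels[i] != cluster_labels[i - 1]]
--     interval2start = defaultdict(list)
--     for s, e in zip(bounds, bounds[1:]):
--         interval2start[e - s].append(s)
--     return interval2start
-- ===== Notes on version B (the rewrite author's own statement) =====
-- stated objective: alternative
-- what changed: B first builds the list of run-boundary indices with a comprehension, then derives each interval as the difference of consecutive boundaries via zip(bounds, bounds[1:]), instead of A's stateful scan that counts run length and writes into the dict in flight.
import Mathlib
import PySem

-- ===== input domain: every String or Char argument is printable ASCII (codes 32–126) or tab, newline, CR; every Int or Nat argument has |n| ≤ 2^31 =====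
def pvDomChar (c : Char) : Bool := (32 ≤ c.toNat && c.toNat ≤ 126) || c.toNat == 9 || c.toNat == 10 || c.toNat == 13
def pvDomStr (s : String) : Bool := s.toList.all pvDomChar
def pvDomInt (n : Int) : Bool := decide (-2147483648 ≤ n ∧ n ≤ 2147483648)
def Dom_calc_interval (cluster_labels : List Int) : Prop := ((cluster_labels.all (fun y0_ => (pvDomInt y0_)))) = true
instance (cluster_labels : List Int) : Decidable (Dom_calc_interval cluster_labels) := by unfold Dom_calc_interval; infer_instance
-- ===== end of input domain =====

-- B builds the run-boundary index list first and turns consecutive boundary pairs into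
-- (length = difference, start) via zip, instead of A's stateful run-length scan that writes
-- into the dict while counting; same cost, different decomposition.
-- Return-value equivalence on non-empty lists; on [] A raises IndexError reading the first element, which Pre_ excludes.

-- ===== PORT A =====
-- state = (interval2start, interval_list, interval_length, prev_label)
def pvStateA : Type := PySem.Dict Int (List Int) × List Int × Int × Int

def calc_interval (cluster_labels : List Int) : List (Int × List Int) :=
  let init : pvStateA :=
    (PySem.Dict.empty, [], 0, PySem.List.pyGetD cluster_labels 0 0)  -- Python reads the first element here; IndexError on the empty list is excluded by Pre_
  let final :=
    (PySem.List.pyRange 1 (PySem.List.len cluster_labels) 1).foldl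
      (fun (s : pvStateA) i =>
        let d := s.1; let lst := s.2.1; let ilen := s.2.2.1 + 1
        if PySem.List.pyGetD cluster_labels i 0 ≠ PySem.List.pyGetD cluster_labels (i - 1) 0 then
          (d.modify ilen [] (fun l => l ++ [i - ilen]), lst ++ [ilen], 0,
            PySem.List.pyGetD cluster_labels i 0)
        else
          (d, lst, ilen, s.2.2.2))
      init
  final.1.items

-- ===== PORT B =====
def calc_interval_alt (cluster_labels : List Int) : List (Int × List Int) :=
  let n := PySem.List.len cluster_labels
  let bounds : List Int :=
    0 :: (PySem.List.pyRange 1 n 1).filter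
      (fun i => PySem.List.pyGetD cluster_labels i 0 != PySem.List.pyGetD cluster_labels (i - 1) 0)
  ((bounds.zip bounds.tail).foldl
      (fun (d : PySem.Dict Int (List Int)) p => d.modify (p.2 - p.1) [] (fun l => l ++ [p.1]))
      PySem.Dict.empty).items

-- ===== PRECONDITION & SPEC =====
-- Pre_ excludes only the empty list, on which A raises IndexError reading the first element.
def Pre_calc_interval (cluster_labels : List Int) : Prop := cluster_labels ≠ []
instance (cluster_labels : List Int) : Decidable (Pre_calc_interval cluster_labels) := by
  unfold Pre_calc_interval; infer_instance

def pvWitness_calc_interval : List Int := [1, 1, 2, 2, 2, 3]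

def Spec_calc_interval (cluster_labels : List Int) (out : List (Int × List Int)) : Prop := out = calc_interval_alt cluster_labels
instance (cluster_labels : List Int) (out : List (Int × List Int)) : Decidable (Spec_calc_interval cluster_labels out) := by unfold Spec_calc_interval; infer_instance

-- ===== CLAIM (what is proved, stated in full; the proofs are below) =====
def Claim_equal_calc_interval : Prop := ∀ (cluster_labels : List Int), Dom_calc_interval cluster_labels → Pre_calc_interval cluster_labels → Spec_calc_interval cluster_labels (calc_interval cluster_labels)

-- ===== LEMMAS AND PROOFS =====

-- A's loop body, abstracted over the two labels it reads and the loop index (proof helper)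
def pvStepA (prev y i : Int) (s : pvStateA) : pvStateA :=
  let d := s.1; let lst := s.2.1; let ilen := s.2.2.1 + 1
  if y ≠ prev then (d.modify ilen [] (fun l => l ++ [i - ilen]), lst ++ [ilen], 0, y)
  else (d, lst, ilen, s.2.2.2)

-- A's loop as a structural recursion over the suffix still to scan
def pvLoopA (prev : Int) (ys : List Int) (i : Int) (s : pvStateA) : pvStateA :=
  match ys with
  | [] => s
  | y :: ys' => pvLoopA y ys' (i + 1) (pvStepA prev y i s)

-- the boundary indices of the suffix ys starting at index i given previous element prev
def pvBounds (prev : Int) (ys : List Int) (i : Int) : List Int :=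
  match ys with
  | [] => []
  | y :: ys' => if y ≠ prev then i :: pvBounds y ys' (i + 1) else pvBounds prev ys' (i + 1)

-- B's pair fold over a boundary list (proof helper)
def pvPairFold (d : PySem.Dict Int (List Int)) (bs : List Int) : PySem.Dict Int (List Int) :=
  (bs.zip bs.tail).foldl
    (fun (d : PySem.Dict Int (List Int)) p => d.modify (p.2 - p.1) [] (fun l => l ++ [p.1])) d

-- step 1a: A's pyRange fold equals pvLoopA on the decomposition xs = p ++ a :: ys
theorem pvFold_eq_loopA (p : List Int) (a : Int) (ys : List Int) (s : pvStateA) :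
    (PySem.List.pyRange ((p.length : Int) + 1) ((p.length : Int) + 1 + ys.length) 1).foldl
      (fun (s : pvStateA) i =>
        let d := s.1; let lst := s.2.1; let ilen := s.2.2.1 + 1
        if PySem.List.pyGetD (p ++ a :: ys) i 0 ≠ PySem.List.pyGetD (p ++ a :: ys) (i - 1) 0 then
          (d.modify ilen [] (fun l => l ++ [i - ilen]), lst ++ [ilen], 0,
            PySem.List.pyGetD (p ++ a :: ys) i 0)
        else
          (d, lst, ilen, s.2.2.2)) s
    = pvLoopA a ys ((p.length : Int) + 1) s := by
  induction ys generalizing p a s with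
  | nil => simp [PySem.List.pyRange_one_eq_nil, pvLoopA]
  | cons y ys' ih =>
    have hlt : ((p.length : Int) + 1) < (p.length : Int) + 1 + ((y :: ys').length : Int) := by
      simp
    rw [PySem.List.pyRange_one_cons hlt]
    have hy : PySem.List.pyGetD (p ++ a :: y :: ys') ((p.length : Int) + 1) 0 = y := by
      have : ((p.length : Int) + 1) = ((p.length + 1 : Nat) : Int) := by push_cast; ring
      rw [this, PySem.List.pyGetD_natCast]
      simp [List.getD]
    have ha : PySem.List.pyGetD (p ++ a :: y :: ys') ((p.length : Int) + 1 - 1) 0 = a := by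
      have : ((p.length : Int) + 1 - 1) = ((p.length : Nat) : Int) := by ring
      rw [this, PySem.List.pyGetD_natCast]
      simp [List.getD]
    simp only [List.foldl_cons, hy, ha]
    have hassoc : p ++ a :: y :: ys' = (p ++ [a]) ++ y :: ys' := by simp
    have hlen : ((p.length : Int) + 1 + 1) = (((p ++ [a]).length : Int) + 1) := by
      simp
    have hend : ((p.length : Int) + 1 + ((y :: ys').length : Int))
        = (((p ++ [a]).length : Int) + 1 + (ys'.length : Int)) := by
      simp; ring
    rw [hassoc, hlen, hend, ih]
    rw [← hlen]
    rfl

-- step 1b: B's filtered pyRange equals pvBounds on the decomposition xs = p ++ a :: ys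
theorem pvFilter_eq_bounds (p : List Int) (a : Int) (ys : List Int) :
    (PySem.List.pyRange ((p.length : Int) + 1) ((p.length : Int) + 1 + ys.length) 1).filter
      (fun i => PySem.List.pyGetD (p ++ a :: ys) i 0 != PySem.List.pyGetD (p ++ a :: ys) (i - 1) 0)
    = pvBounds a ys ((p.length : Int) + 1) := by
  induction ys generalizing p a with
  | nil => simp [PySem.List.pyRange_one_eq_nil, pvBounds]
  | cons y ys' ih =>
    have hlt : ((p.length : Int) + 1) < (p.length : Int) + 1 + ((y :: ys').length : Int) := by
      simp
    rw [PySem.List.pyRange_one_cons hlt]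
    have hy : PySem.List.pyGetD (p ++ a :: y :: ys') ((p.length : Int) + 1) 0 = y := by
      have : ((p.length : Int) + 1) = ((p.length + 1 : Nat) : Int) := by push_cast; ring
      rw [this, PySem.List.pyGetD_natCast]
      simp [List.getD]
    have ha : PySem.List.pyGetD (p ++ a :: y :: ys') ((p.length : Int) + 1 - 1) 0 = a := by
      have : ((p.length : Int) + 1 - 1) = ((p.length : Nat) : Int) := by ring
      rw [this, PySem.List.pyGetD_natCast]
      simp [List.getD]
    rw [List.filter_cons]
    have hassoc : p ++ a :: y :: ys' = (p ++ [a]) ++ y :: ys' := by simp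
    have hlen : ((p.length : Int) + 1 + 1) = (((p ++ [a]).length : Int) + 1) := by simp
    have hend : ((p.length : Int) + 1 + ((y :: ys').length : Int))
        = (((p ++ [a]).length : Int) + 1 + (ys'.length : Int)) := by
      simp; ring
    have htail :
        (PySem.List.pyRange ((p.length : Int) + 1 + 1) ((p.length : Int) + 1 + ((y :: ys').length : Int)) 1).filter
          (fun i => PySem.List.pyGetD (p ++ a :: y :: ys') i 0 != PySem.List.pyGetD (p ++ a :: y :: ys') (i - 1) 0)
        = pvBounds y ys' ((p.length : Int) + 1 + 1) := by
      rw [hassoc, hlen, hend, ih]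
    simp only [pvBounds, hy, ha, htail]
    by_cases hne : y = a
    · simp [hne]
    · simp [hne, bne_iff_ne]

-- zip-fold unrolls one boundary pair
theorem pvPairFold_cons (d : PySem.Dict Int (List Int)) (c h : Int) (t : List Int) :
    pvPairFold d (c :: h :: t)
      = pvPairFold (d.modify (h - c) [] (fun l => l ++ [c])) (h :: t) := by
  simp [pvPairFold]

-- step 2: pvLoopA's dict equals B's pair fold over the boundaries, under the run invariant
theorem pvLoopA_eq_pairFold (ys : List Int) (prev i blen : Int) (d : PySem.Dict Int (List Int))
    (lst : List Int) (pv : Int) :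
    (pvLoopA prev ys i (d, lst, blen - 1, pv)).1
    = pvPairFold d ((i - blen) :: pvBounds prev ys i) := by
  induction ys generalizing prev i blen d lst pv with
  | nil => simp [pvLoopA, pvBounds, pvPairFold]
  | cons y ys' ih =>
    simp only [pvLoopA, pvStepA, pvBounds]
    by_cases hy : y = prev
    · subst hy
      rw [if_neg (show ¬ y ≠ y from fun h => h rfl), if_neg (show ¬ y ≠ y from fun h => h rfl)]
      have h1 : blen - 1 + 1 = (blen + 1) - 1 := by ring
      rw [h1, ih]
      have h2 : i + 1 - (blen + 1) = i - blen := by ring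
      rw [h2]
    · rw [if_pos hy, if_pos hy]
      have h2 : blen - 1 + 1 = blen := by ring
      rw [h2]
      have h1 : (0 : Int) = 1 - 1 := by norm_num
      rw [h1, ih y (i + 1) 1]
      have h3 : i + 1 - 1 = i := by ring
      rw [h3, pvPairFold_cons]
      have h4 : i - (i - blen) = blen := by ring
      rw [h4]

-- ===== VERDICT (by name: the statement is the Claim_ definition above) =====
theorem calc_interval_spec : Claim_equal_calc_interval := by
  intro xs _ hpre
  unfold Spec_calc_interval calc_interval calc_interval_alt
  match xs, hpre with
  | x :: rest, _ =>
    dsimp only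
    have h0 : PySem.List.len (x :: rest) = (1 : Int) + (rest.length : Int) := by
      simp [PySem.List.len]; omega
    rw [h0]
    have hA := pvFold_eq_loopA [] x rest
      (PySem.Dict.empty, [], 0, PySem.List.pyGetD (x :: rest) 0 0)
    simp only [List.nil_append, List.length_nil, Nat.cast_zero, zero_add] at hA
    rw [hA]
    have hB := pvFilter_eq_bounds [] x rest
    simp only [List.nil_append, List.length_nil, Nat.cast_zero, zero_add] at hB
    rw [hB]
    have hL := pvLoopA_eq_pairFold rest x 1 1 PySem.Dict.empty []
      (PySem.List.pyGetD (x :: rest) 0 0)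
    simp only [show (1 : Int) - 1 = 0 from rfl] at hL
    rw [hL]
    rfl
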